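-- pv_equiv track=rewrite | github.com/KristinStefanova/Python101 | week02/final_round.py | numbers_to_message
-- ===== SOURCE A (Python) =====
-- def group(things):
--     result = []
--     count = 0
--     index = 0
--     while index < len(things):
--         for j in range(index, len(things)):
--             if things[index] == things[j]:
--                 count += 1
--             else:
--                 break
--         result.append([things[index]] * (count))
--         index += count
--         count = 0
--     return result
--
-- def numbers_to_message(pressed_sequence):
--     keyboard = {2: "abc", 3: "def", 4: "ghi", 5: "jkl",
--                 6: "mno", 7: "pqrs", 8: "tuv", 9: "wxyz"}
--     groups = group(pressed_sequence)
--     result = ""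
--     is_cap = False
--     for g in groups:
--         if g == [0]:
--             result += " "
--         elif g == [-1]:
--             continue
--         elif g == [1]:
--             is_cap = True
--             continue
--         else:
--             key = g[0]
--             letter = keyboard[key][(len(g) - 1) % len(keyboard[key])]
--             if is_cap:
--                 letter = letter.upper()
--                 is_cap = False
--             result += letter
--     return result
-- ===== SOURCE B (Python) =====
-- def numbers_to_message(pressed_sequence):
--     keyboard = {2: "abc", 3: "def", 4: "ghi", 5: "jkl",
--                 6: "mno", 7: "pqrs", 8: "tuv", 9: "wxyz"}
--     out = []
--     cap = False
--     prev = None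
--     run = 0
--     for v in pressed_sequence:
--         if prev == v:
--             # the key repeats: advance the cycle and overwrite the last letter
--             run += 1
--             letters = keyboard[v]
--             ch = letters[(run - 1) % len(letters)]
--             if out[-1].isupper():
--                 ch = ch.upper()
--             out[-1] = ch
--         else:
--             run = 1
--             if v == 0:
--                 out.append(" ")
--             elif v == -1:
--                 pass
--             elif v == 1:
--                 cap = True
--             else:
--                 ch = keyboard[v][0]
--                 if cap:
--                     ch = ch.upper()
--                     cap = False
--                 out.append(ch)
--         prev = v
--     return "".join(out)
-- ===== Notes on version B (the rewrite author's own statement) =====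
-- stated objective: alternative
-- what changed: B drops A's group()-then-translate two-stage design entirely: it folds over the elements one at a time and, when a key repeats, overwrites the last emitted character with the next letter of that key's cycle (re-uppercasing if the overwritten one was uppercase), so no run lists are ever built and no run length is ever measured.
import Mathlib
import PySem

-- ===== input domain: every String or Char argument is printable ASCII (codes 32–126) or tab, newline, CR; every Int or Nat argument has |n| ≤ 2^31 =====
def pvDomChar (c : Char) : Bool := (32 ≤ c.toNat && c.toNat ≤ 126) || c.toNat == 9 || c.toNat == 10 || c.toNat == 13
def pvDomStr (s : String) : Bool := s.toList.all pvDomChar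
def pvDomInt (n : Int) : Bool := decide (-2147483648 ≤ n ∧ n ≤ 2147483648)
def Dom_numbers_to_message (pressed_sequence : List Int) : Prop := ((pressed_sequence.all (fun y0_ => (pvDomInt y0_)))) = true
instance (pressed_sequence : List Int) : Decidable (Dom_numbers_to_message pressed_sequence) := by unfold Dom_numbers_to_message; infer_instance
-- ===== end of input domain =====

-- B replaces A's group-then-translate design with a per-element fold that, when a key repeats, overwrites the last emitted character with the next letter of the cycle (alternative decomposition; same return value wherever A returns).


-- ===== PORT A =====
-- the keyboard dict literal (identical in both sources); Python's keyboard[key] raises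
-- KeyError for a missing key — those inputs are outside Pre_, here "" stands in
def pvKb (k : Int) : String :=
  if k == 2 then "abc" else if k == 3 then "def" else if k == 4 then "ghi"
  else if k == 5 then "jkl" else if k == 6 then "mno" else if k == 7 then "pqrs"
  else if k == 8 then "tuv" else if k == 9 then "wxyz" else ""

-- inner 'for j in range(index, len)' loop of group(): how many further elements equal v
def pvRunLen (v : Int) : List Int → Nat
  | [] => 0
  | x :: rest => if x == v then 1 + pvRunLen v rest else 0

-- the outer while loop of group(): appends [things[index]] * count, advances index by count
def pvGroup : List Int → List (List Int)
  | [] => []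
  | v :: rest =>
    List.replicate (1 + pvRunLen v rest) v :: pvGroup (rest.drop (pvRunLen v rest))
termination_by l => l.length
decreasing_by simp [List.length_drop]

-- the body of A's 'for g in groups' loop over the state (result, is_cap)
def pvStepA (st : String × Bool) (g : List Int) : String × Bool :=
  if g == [(0 : Int)] then (st.1 ++ " ", st.2)
  else if g == [(-1 : Int)] then st
  else if g == [(1 : Int)] then (st.1, true)
  else
    let s := pvKb (g.headD 0)
    let letter := s.toList.getD ((g.length - 1) % s.toList.length) ' '
    let letter := if st.2 then letter.toUpper else letter
    (st.1 ++ String.ofList [letter], false)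

def numbers_to_message (pressed_sequence : List Int) : String :=
  ((pvGroup pressed_sequence).foldl pvStepA ("", false)).1

-- ===== PORT B =====
-- B's per-element step over the state (out, cap, prev, run): a repeated key overwrites
-- the last character of out with the next letter of the cycle (re-uppercased if the
-- previous one was uppercase); otherwise the element starts a fresh run
def pvStepB (st : List Char × Bool × Option Int × Nat) (v : Int) :
    List Char × Bool × Option Int × Nat :=
  match st with
  | (out, cap, prev, run) =>
    if prev == some v then
      let run := run + 1
      let letters := (pvKb v).toList
      let ch := letters.getD ((run - 1) % letters.length) ' '
      let ch := if (out.getLastD ' ').isUpper then ch.toUpper else ch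
      (out.dropLast ++ [ch], cap, some v, run)
    else
      if v == 0 then (out ++ [' '], cap, some v, 1)
      else if v == -1 then (out, cap, some v, 1)
      else if v == 1 then (out, true, some v, 1)
      else
        let ch := (pvKb v).toList.getD 0 ' '
        (out ++ [if cap then ch.toUpper else ch], if cap then false else cap, some v, 1)

def numbers_to_message_alt (pressed_sequence : List Int) : String :=
  String.ofList ((pressed_sequence.foldl pvStepB ([], false, none, 0)).1)

-- ===== PRECONDITION & SPEC =====
-- Pre_ excludes exactly the inputs on which the Python A raises KeyError: an element
-- outside -1..9, or two adjacent equal elements with value ≤ 1 (a run of a special key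
-- -1/0/1 of length ≥ 2 falls through to keyboard[key]); B raises KeyError there too.
def Pre_numbers_to_message (pressed_sequence : List Int) : Prop :=
  (∀ x ∈ pressed_sequence, -1 ≤ x ∧ x ≤ 9) ∧
  (∀ p ∈ pressed_sequence.zip pressed_sequence.tail, p.1 = p.2 → 2 ≤ p.1)
instance (pressed_sequence : List Int) : Decidable (Pre_numbers_to_message pressed_sequence) := by
  unfold Pre_numbers_to_message; infer_instance

def pvWitness_numbers_to_message : List Int := [1, 4, 4, -1, 4, 0, 2, 2, 2, 2]

def Spec_numbers_to_message (pressed_sequence : List Int) (out : String) : Prop := out = numbers_to_message_alt pressed_sequence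
instance (pressed_sequence : List Int) (out : String) : Decidable (Spec_numbers_to_message pressed_sequence out) := by unfold Spec_numbers_to_message; infer_instance

-- ===== CLAIM (what is proved, stated in full; the proofs are below) =====
def Claim_equal_numbers_to_message : Prop := ∀ (pressed_sequence : List Int), Dom_numbers_to_message pressed_sequence → Pre_numbers_to_message pressed_sequence → Spec_numbers_to_message pressed_sequence (numbers_to_message pressed_sequence)

-- ===== LEMMAS AND PROOFS =====

-- the letter produced for a run of key v of length k+1, with casing flag b
def pvChv (v : Int) (b : Bool) (k : Nat) : Char :=
  let letters := (pvKb v).toList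
  let c := letters.getD (k % letters.length) ' '
  if b then c.toUpper else c

lemma pvKb_len_pos (v : Int) (hv : 2 ≤ v ∧ v ≤ 9) : 0 < (pvKb v).toList.length := by
  obtain ⟨h1, h2⟩ := hv
  interval_cases v <;> simp [pvKb]

lemma pvKb_lower (v : Int) (hv : 2 ≤ v ∧ v ≤ 9) :
    ∀ c ∈ (pvKb v).toList, c.isUpper = false ∧ c.toUpper.isUpper = true := by
  obtain ⟨h1, h2⟩ := hv
  interval_cases v
  · rw [show (pvKb 2).toList = ['a','b','c'] by simp [pvKb]]
    intro c hc; fin_cases hc <;> decide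
  · rw [show (pvKb 3).toList = ['d','e','f'] by simp [pvKb]]
    intro c hc; fin_cases hc <;> decide
  · rw [show (pvKb 4).toList = ['g','h','i'] by simp [pvKb]]
    intro c hc; fin_cases hc <;> decide
  · rw [show (pvKb 5).toList = ['j','k','l'] by simp [pvKb]]
    intro c hc; fin_cases hc <;> decide
  · rw [show (pvKb 6).toList = ['m','n','o'] by simp [pvKb]]
    intro c hc; fin_cases hc <;> decide
  · rw [show (pvKb 7).toList = ['p','q','r','s'] by simp [pvKb]]
    intro c hc; fin_cases hc <;> decide
  · rw [show (pvKb 8).toList = ['t','u','v'] by simp [pvKb]]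
    intro c hc; fin_cases hc <;> decide
  · rw [show (pvKb 9).toList = ['w','x','y','z'] by simp [pvKb]]
    intro c hc; fin_cases hc <;> decide

lemma isUpper_if (b : Bool) (c : Char) (h1 : c.isUpper = false) (h2 : c.toUpper.isUpper = true) :
    (if b then c.toUpper else c).isUpper = b := by
  cases b <;> simp [h1, h2]

lemma pvChv_isUpper (v : Int) (hv : 2 ≤ v ∧ v ≤ 9) (b : Bool) (k : Nat) :
    (pvChv v b k).isUpper = b := by
  have hlen := pvKb_len_pos v hv
  have hmem : (pvKb v).toList.getD (k % (pvKb v).toList.length) ' ' ∈ (pvKb v).toList := by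
    rw [List.getD_eq_getElem _ _ (Nat.mod_lt _ hlen)]
    exact List.getElem_mem _
  have h := pvKb_lower v hv _ hmem
  simp only [pvChv]
  exact isUpper_if b _ h.1 h.2

lemma getLastD_concat (l : List Char) (c : Char) : (l ++ [c]).getLastD ' ' = c := by
  induction l with
  | nil => rfl
  | cons x xs ih => simpa [List.getLastD] using ih

-- the run-extension invariant of B: folding over n further copies of v from a state
-- whose last character is the run-(k+1) letter yields the run-(k+n+1) letter
lemma pvRunInv (v : Int) (hv : 2 ≤ v ∧ v ≤ 9) (b : Bool) :
    ∀ (n k : Nat) (out : List Char) (cap : Bool),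
      List.foldl pvStepB (out ++ [pvChv v b k], cap, some v, k + 1) (List.replicate n v)
        = (out ++ [pvChv v b (k + n)], cap, some v, k + n + 1) := by
  intro n
  induction n with
  | zero => intro k out cap; simp
  | succ m ih =>
    intro k out cap
    rw [List.replicate_succ, List.foldl_cons]
    have hstep : pvStepB (out ++ [pvChv v b k], cap, some v, k + 1) v
        = (out ++ [pvChv v b (k + 1)], cap, some v, k + 1 + 1) := by
      simp only [pvStepB, beq_self_eq_true, if_true]
      rw [getLastD_concat, pvChv_isUpper v hv, List.dropLast_concat]
      simp only [Nat.add_sub_cancel, pvChv]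
    rw [hstep, ih (k + 1) out cap]
    have h1 : k + 1 + m = k + (m + 1) := by omega
    rw [h1]

lemma pvDrop_runLen (v : Int) (l : List Int) :
    l.drop (pvRunLen v l) = l.dropWhile (fun x => x == v) := by
  induction l with
  | nil => simp [pvRunLen]
  | cons x rest ih =>
    cases hb : (x == v) with
    | true => simp [pvRunLen, hb, Nat.add_comm, ih]
    | false => simp [pvRunLen, hb]

lemma takeWhile_eq_replicate (v : Int) (l : List Int) :
    l.takeWhile (fun x => x == v) = List.replicate (pvRunLen v l) v := by
  induction l with
  | nil => simp [pvRunLen]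
  | cons x rest ih =>
    cases hb : (x == v) with
    | true =>
      have : x = v := by simpa using hb
      subst this
      simp [pvRunLen, ih, Nat.add_comm, List.replicate_succ]
    | false => simp [pvRunLen, hb]

lemma head?_dropWhile {α : Type} (p : α → Bool) (l : List α) (h : α)
    (hh : (l.dropWhile p).head? = some h) : p h = false := by
  induction l with
  | nil => simp [List.dropWhile] at hh
  | cons x xs ih =>
    by_cases hp : p x
    · rw [List.dropWhile_cons_of_pos hp] at hh; exact ih hh
    · rw [List.dropWhile_cons_of_neg hp] at hh
      simp at hh; subst hh; simpa using hp

lemma Pre_tail (x : Int) (l : List Int)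
    (h : Pre_numbers_to_message (x :: l)) : Pre_numbers_to_message l := by
  obtain ⟨h1, h2⟩ := h
  refine ⟨fun y hy => h1 y (List.mem_cons_of_mem _ hy), fun p hp hpp => ?_⟩
  apply h2 p _ hpp
  cases l with
  | nil => simp [List.zip] at hp
  | cons y l' => simpa [List.zip] using Or.inr hp

lemma Pre_suffix (l1 l2 : List Int) (hs : l2 <:+ l1)
    (h : Pre_numbers_to_message l1) : Pre_numbers_to_message l2 := by
  obtain ⟨t, ht⟩ := hs
  subst ht
  induction t with
  | nil => simpa using h
  | cons x t' ih => exact ih (Pre_tail x _ h)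

-- the main invariant: B's element fold and A's group fold agree on output and cap flag
lemma pvMain : ∀ (N : Nat) (ps : List Int), ps.length ≤ N →
    Pre_numbers_to_message ps →
    ∀ (out : List Char) (cap : Bool) (prev : Option Int) (run : Nat),
      (∀ h, ps.head? = some h → prev ≠ some h) →
      String.ofList ((ps.foldl pvStepB (out, cap, prev, run)).1)
          = ((pvGroup ps).foldl pvStepA (String.ofList out, cap)).1 ∧
      (ps.foldl pvStepB (out, cap, prev, run)).2.1
          = ((pvGroup ps).foldl pvStepA (String.ofList out, cap)).2 := by
  intro N
  induction N with
  | zero =>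
    intro ps hps _ out cap prev run _
    have : ps = [] := List.eq_nil_of_length_eq_zero (Nat.le_zero.mp hps)
    subst this
    constructor <;> simp [pvGroup]
  | succ N ihN =>
    intro ps hps hpre out cap prev run hfresh
    cases ps with
    | nil => constructor <;> simp [pvGroup]
    | cons v rest =>
      have hsplit : rest = List.replicate (pvRunLen v rest) v
          ++ rest.dropWhile (fun x => x == v) := by
        conv_lhs => rw [← List.takeWhile_append_dropWhile (p := fun x => x == v) (l := rest)]
        rw [takeWhile_eq_replicate]
      have hlen' : (rest.dropWhile (fun x => x == v)).length ≤ N := by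
        have := List.length_dropWhile_le (p := fun x => x == v) (l := rest)
        simp at hps; omega
      have hpre' : Pre_numbers_to_message (rest.dropWhile (fun x => x == v)) := by
        apply Pre_suffix (v :: rest)
        · exact (List.dropWhile_suffix _).trans (List.suffix_cons _ _)
        · exact hpre
      have hfresh' : ∀ h, (rest.dropWhile (fun x => x == v)).head? = some h
          → (some v : Option Int) ≠ some h := by
        intro h hh hcontra
        have := head?_dropWhile _ rest h hh
        simp at hcontra this
        exact this hcontra.symm
      have hprevne : (prev == some v) = false := by
        have := hfresh v rfl
        simpa [beq_eq_false_iff_ne] using this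
      have hbounds : -1 ≤ v ∧ v ≤ 9 := hpre.1 v (List.mem_cons_self)
      have hGroup : pvGroup (v :: rest)
          = List.replicate (1 + pvRunLen v rest) v :: pvGroup (rest.dropWhile (fun x => x == v)) := by
        rw [pvGroup, pvDrop_runLen]
      by_cases hspec : v = 0 ∨ v = -1 ∨ v = 1
      · -- special keys: Pre_ forces the run length 1
        have hnz : pvRunLen v rest = 0 := by
          cases rest with
          | nil => rfl
          | cons r rest2 =>
            by_cases hr : r = v
            · exfalso
              subst hr
              have hp := hpre.2 (r, r) (by simp [List.zip]) rfl
              rcases hspec with h | h | h <;> omega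
            · have : (r == v) = false := by simpa [beq_eq_false_iff_ne] using hr
              simp [pvRunLen, this]
        have hrr : rest.dropWhile (fun x => x == v) = rest := by
          have h := hsplit
          rw [hnz] at h
          simpa using h.symm
        have hfreshR : ∀ h, rest.head? = some h → (some v : Option Int) ≠ some h := by
          rw [← hrr]; exact hfresh'
        have hlenR : rest.length ≤ N := by simp at hps; omega
        rw [hGroup, hnz]
        rcases hspec with h | h | h <;> subst h
        · rw [List.foldl_cons, List.foldl_cons]
          have hB : pvStepB (out, cap, prev, run) 0 = (out ++ [' '], cap, some 0, 1) := by
            simp [pvStepB, hprevne]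
          have hA : pvStepA (String.ofList out, cap) (List.replicate 1 0)
              = (String.ofList out ++ " ", cap) := by
            simp [pvStepA, List.replicate]
          rw [hB, hA, hrr]
          have hsp : String.ofList out ++ " " = String.ofList (out ++ [' ']) := by
            rw [← String.ofList_append]
          rw [hsp]
          exact ihN rest hlenR (Pre_tail _ _ hpre) _ _ _ _ hfreshR
        · rw [List.foldl_cons, List.foldl_cons]
          have hB : pvStepB (out, cap, prev, run) (-1) = (out, cap, some (-1), 1) := by
            simp [pvStepB, hprevne]
          have hA : pvStepA (String.ofList out, cap) (List.replicate 1 (-1))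
              = (String.ofList out, cap) := by
            simp [pvStepA, List.replicate]
          rw [hB, hA, hrr]
          exact ihN rest hlenR (Pre_tail _ _ hpre) _ _ _ _ hfreshR
        · rw [List.foldl_cons, List.foldl_cons]
          have hB : pvStepB (out, cap, prev, run) 1 = (out, true, some 1, 1) := by
            simp [pvStepB, hprevne]
          have hA : pvStepA (String.ofList out, cap) (List.replicate 1 1)
              = (String.ofList out, true) := by
            simp [pvStepA, List.replicate]
          rw [hB, hA, hrr]
          exact ihN rest hlenR (Pre_tail _ _ hpre) _ _ _ _ hfreshR
      · -- a letter key: 2 ≤ v ≤ 9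
        simp only [not_or] at hspec
        have hv : 2 ≤ v ∧ v ≤ 9 := by
          obtain ⟨h0, hm1, h1⟩ := hspec
          rcases hbounds with ⟨hb1, hb2⟩
          constructor <;> omega
        have hB1 : pvStepB (out, cap, prev, run) v
            = (out ++ [pvChv v cap 0], if cap then false else cap, some v, 1) := by
          have hv0 : (v == 0) = false := by simpa [beq_eq_false_iff_ne] using hspec.1
          have hvm : (v == -1) = false := by simpa [beq_eq_false_iff_ne] using hspec.2.1
          have hv1 : (v == 1) = false := by simpa [beq_eq_false_iff_ne] using hspec.2.2
          simp [pvStepB, hprevne, hv0, hvm, hv1, pvChv]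
        have hcap' : (if cap then false else cap) = false := by cases cap <;> rfl
        have hBrun : List.foldl pvStepB (out, cap, prev, run) (v :: rest)
            = List.foldl pvStepB
                (out ++ [pvChv v cap (pvRunLen v rest)], false, some v, pvRunLen v rest + 1)
                (rest.dropWhile (fun x => x == v)) := by
          conv_lhs => rw [hsplit]
          rw [List.foldl_cons, hB1, hcap', List.foldl_append,
            pvRunInv v hv cap (pvRunLen v rest) 0 out false]
          simp only [Nat.zero_add]
        have hA1 : pvStepA (String.ofList out, cap) (List.replicate (1 + pvRunLen v rest) v)
            = (String.ofList out ++ String.ofList [pvChv v cap (pvRunLen v rest)], false) := by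
          have hgne : ∀ w : Int, w ≠ v →
              (List.replicate (1 + pvRunLen v rest) v == [w]) = false := by
            intro w hw
            rw [beq_eq_false_iff_ne]
            intro h
            have h1 := congrArg List.length h
            simp at h1
            rw [Nat.add_comm, h1] at h
            simp [List.replicate] at h
            exact hw h.symm
          have hne0 := hgne 0 (fun h => hspec.1 h.symm)
          have hnem := hgne (-1) (fun h => hspec.2.1 h.symm)
          have hne1 := hgne 1 (fun h => hspec.2.2 h.symm)
          have hhead : (List.replicate (1 + pvRunLen v rest) v).headD 0 = v := by
            rw [Nat.add_comm, List.replicate_succ]; rfl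
          have hlen : (List.replicate (1 + pvRunLen v rest) v).length
              = 1 + pvRunLen v rest := List.length_replicate
          simp only [pvStepA, hne0, hnem, hne1, Bool.false_eq_true, if_false, hhead, hlen]
          have h2 : 1 + pvRunLen v rest - 1 = pvRunLen v rest := by omega
          rw [h2]
          cases cap <;> simp [pvChv]
        have hof : String.ofList out ++ String.ofList [pvChv v cap (pvRunLen v rest)]
            = String.ofList (out ++ [pvChv v cap (pvRunLen v rest)]) := by
          rw [← String.ofList_append]
        rw [hBrun, hGroup, List.foldl_cons, hA1, hof]
        exact ihN _ hlen' hpre' _ _ _ _ hfresh'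

-- ===== VERDICT (by name: the statement is the Claim_ definition above) =====
theorem numbers_to_message_spec : Claim_equal_numbers_to_message := by
  intro ps _ hpre
  unfold Spec_numbers_to_message numbers_to_message numbers_to_message_alt
  have := (pvMain ps.length ps (le_refl _) hpre [] false none 0
    (by intro h _ hc; cases hc)).1
  simpa using this.symm
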